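-- pv_equiv track=rewrite | github.com/KrzysztofB66/Bioinformatyka | dna.py | determine_amino_acid
-- ===== SOURCE A (Python) =====
-- def determine_amino_acid(codon):
--     """
--     Określa aminokwas na podstawie trójnukleotydowego kodonu mRNA.
--
--     Args:
--         codon (str): Kodon mRNA (ciąg trzech nukleotydów: U, C, A, G).
--
--     Returns:
--         str: Kodowany aminokwas, lub 'stop' w przypadku kodonu stop.
--         str: Komunikat o błędzie, jeśli kodon jest nieprawidłowy.
--     """
--     codon_table = {
--         'U': {
--             'U': {'U': 'F', 'C': 'F', 'A': 'L', 'G': 'L'},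
--             'C': {'U': 'S', 'C': 'S', 'A': 'S', 'G': 'S'},
--             'A': {'U': 'Y', 'C': 'Y', 'A': None, 'G': None},
--             'G': {'U': 'C', 'C': 'C', 'A': None, 'G': 'W'}
--         },
--         'C': {
--             'U': {'U': 'L', 'C': 'L', 'A': 'L', 'G': 'L'},
--             'C': {'U': 'P', 'C': 'P', 'A': 'P', 'G': 'P'},
--             'A': {'U': 'H', 'C': 'H', 'A': 'Q', 'G': 'Q'},
--             'G': {'U': 'R', 'C': 'R', 'A': 'R', 'G': 'R'}
--         },
--         'A': {
--             'U': {'U': 'I', 'C': 'I', 'A': 'I', 'G': 'M'},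
--             'C': {'U': 'T', 'C': 'T', 'A': 'T', 'G': 'T'},
--             'A': {'U': 'N', 'C': 'N', 'A': 'K', 'G': 'K'},
--             'G': {'U': 'S', 'C': 'S', 'A': 'R', 'G': 'R'}
--         },
--         'G': {
--             'U': {'U': 'V', 'C': 'V', 'A': 'V', 'G': 'V'},
--             'C': {'U': 'A', 'C': 'A', 'A': 'A', 'G': 'A'},
--             'A': {'U': 'D', 'C': 'D', 'A': 'E', 'G': 'E'},
--             'G': {'U': 'G', 'C': 'G', 'A': 'G', 'G': 'G'}
--         }
--     }
--
--     if len(codon) != 3: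
--         return "Error: Codon must be 3 nucleotides long."
--
--     codon = codon.upper()
--
--     for nucleotide in codon:
--         if nucleotide not in 'UCAG':
--             return "Error: Codon contains invalid characters."
--
--     amino_acid = codon_table[codon[0]][codon[1]][codon[2]]
--
--     if amino_acid is None:
--         return "stop"
--     else:
--         return amino_acid
-- ===== SOURCE B (Python) =====
-- # Genetic code as degenerate rules: first two nucleotides + set of allowed
-- # thirds; the first matching rule in a linear scan gives the amino acid.
-- _RULES = [
--     ("UU", "UC", "F"), ("UU", "AG", "L"),
--     ("UC", "UCAG", "S"),
--     ("UA", "UC", "Y"), ("UA", "AG", "stop"),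
--     ("UG", "UC", "C"), ("UG", "A", "stop"), ("UG", "G", "W"),
--     ("CU", "UCAG", "L"), ("CC", "UCAG", "P"),
--     ("CA", "UC", "H"), ("CA", "AG", "Q"), ("CG", "UCAG", "R"),
--     ("AU", "UCA", "I"), ("AU", "G", "M"), ("AC", "UCAG", "T"),
--     ("AA", "UC", "N"), ("AA", "AG", "K"),
--     ("AG", "UC", "S"), ("AG", "AG", "R"),
--     ("GU", "UCAG", "V"), ("GC", "UCAG", "A"),
--     ("GA", "UC", "D"), ("GA", "AG", "E"), ("GG", "UCAG", "G"),
-- ]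
--
--
-- def determine_amino_acid(codon):
--     if len(codon) != 3:
--         return "Error: Codon must be 3 nucleotides long."
--
--     codon = codon.upper()
--
--     for nucleotide in codon:
--         if nucleotide not in 'UCAG':
--             return "Error: Codon contains invalid characters."
--
--     # The rules are exhaustive over the 64 valid codons, so the scan
--     # always returns.
--     for prefix, thirds, aa in _RULES:
--         if codon.startswith(prefix) and codon[2] in thirds:
--             return aa
-- ===== Notes on version B (the rewrite author's own statement) =====
-- stated objective: alternative
-- what changed: The three-level nested-dict lookup is replaced by a linear first-match scan over a flat list of 25 degenerate genetic-code rules (two-nucleotide prefix plus the set of allowed third nucleotides), with the validation checks unchanged.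
import Mathlib
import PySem

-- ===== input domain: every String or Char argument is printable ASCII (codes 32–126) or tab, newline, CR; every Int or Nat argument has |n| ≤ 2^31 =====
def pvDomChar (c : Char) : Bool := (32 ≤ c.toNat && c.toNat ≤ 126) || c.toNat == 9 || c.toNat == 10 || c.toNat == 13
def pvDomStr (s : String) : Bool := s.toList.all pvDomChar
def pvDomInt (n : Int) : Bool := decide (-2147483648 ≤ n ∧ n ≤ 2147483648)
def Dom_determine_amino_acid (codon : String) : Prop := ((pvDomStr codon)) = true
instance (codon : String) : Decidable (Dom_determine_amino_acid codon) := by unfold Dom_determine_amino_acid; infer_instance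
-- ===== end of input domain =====

-- B replaces A's nested-dict lookup by a linear first-match scan over a flat
-- list of degenerate genetic-code rules (objective: alternative).

-- ===== PORT A =====
-- the nested codon table of A (None -> none)
def pvRow (a b c d : Option String) : PySem.Dict Char (Option String) :=
  PySem.Dict.ofList [('U', a), ('C', b), ('A', c), ('G', d)]

def pvCodonTable : PySem.Dict Char (PySem.Dict Char (PySem.Dict Char (Option String))) :=
  PySem.Dict.ofList
    [ ('U', PySem.Dict.ofList
        [ ('U', pvRow (some "F") (some "F") (some "L") (some "L"))
        , ('C', pvRow (some "S") (some "S") (some "S") (some "S"))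
        , ('A', pvRow (some "Y") (some "Y") none none)
        , ('G', pvRow (some "C") (some "C") none (some "W")) ])
    , ('C', PySem.Dict.ofList
        [ ('U', pvRow (some "L") (some "L") (some "L") (some "L"))
        , ('C', pvRow (some "P") (some "P") (some "P") (some "P"))
        , ('A', pvRow (some "H") (some "H") (some "Q") (some "Q"))
        , ('G', pvRow (some "R") (some "R") (some "R") (some "R")) ])
    , ('A', PySem.Dict.ofList
        [ ('U', pvRow (some "I") (some "I") (some "I") (some "M"))
        , ('C', pvRow (some "T") (some "T") (some "T") (some "T"))
        , ('A', pvRow (some "N") (some "N") (some "K") (some "K"))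
        , ('G', pvRow (some "S") (some "S") (some "R") (some "R")) ])
    , ('G', PySem.Dict.ofList
        [ ('U', pvRow (some "V") (some "V") (some "V") (some "V"))
        , ('C', pvRow (some "A") (some "A") (some "A") (some "A"))
        , ('A', pvRow (some "D") (some "D") (some "E") (some "E"))
        , ('G', pvRow (some "G") (some "G") (some "G") (some "G")) ]) ]

def determine_amino_acid (codon : String) : String :=
  if PySem.Str.len codon ≠ 3 then "Error: Codon must be 3 nucleotides long."
  else
    let cs := PySem.Chars.upper codon.toList
    if cs.any (fun n => !(['U', 'C', 'A', 'G'].contains n)) then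
      "Error: Codon contains invalid characters."
    else
      -- codon[0]/[1]/[2] cannot raise (length = 3 was just checked), so the
      -- getD defaults below are never used; likewise the KeyError paths of
      -- codon_table[...][...][...] are unreachable (every character is in 'UCAG').
      let c0 := (PySem.List.pyGet? cs 0).getD ' '
      let c1 := (PySem.List.pyGet? cs 1).getD ' '
      let c2 := (PySem.List.pyGet? cs 2).getD ' '
      let amino_acid : Option String :=
        ((pvCodonTable.getD c0 PySem.Dict.empty).getD c1 PySem.Dict.empty).getD c2 none
      if amino_acid = none then "stop" else amino_acid.getD ""

-- ===== PORT B =====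
-- the flat rule list of B: (two-nucleotide prefix, allowed third nucleotides, amino acid)
def pvRules : List (List Char × List Char × String) :=
  [ ("UU".toList, "UC".toList, "F"), ("UU".toList, "AG".toList, "L")
  , ("UC".toList, "UCAG".toList, "S")
  , ("UA".toList, "UC".toList, "Y"), ("UA".toList, "AG".toList, "stop")
  , ("UG".toList, "UC".toList, "C"), ("UG".toList, "A".toList, "stop"), ("UG".toList, "G".toList, "W")
  , ("CU".toList, "UCAG".toList, "L"), ("CC".toList, "UCAG".toList, "P")
  , ("CA".toList, "UC".toList, "H"), ("CA".toList, "AG".toList, "Q"), ("CG".toList, "UCAG".toList, "R")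
  , ("AU".toList, "UCA".toList, "I"), ("AU".toList, "G".toList, "M"), ("AC".toList, "UCAG".toList, "T")
  , ("AA".toList, "UC".toList, "N"), ("AA".toList, "AG".toList, "K")
  , ("AG".toList, "UC".toList, "S"), ("AG".toList, "AG".toList, "R")
  , ("GU".toList, "UCAG".toList, "V"), ("GC".toList, "UCAG".toList, "A")
  , ("GA".toList, "UC".toList, "D"), ("GA".toList, "AG".toList, "E"), ("GG".toList, "UCAG".toList, "G") ]

-- the 'for prefix, thirds, aa in _RULES' scan, returning on the first match;
-- Python falls off the loop (None) only on inputs the validation already rejected,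
-- so the [] default is unreachable on valid codons.
def pvScanRules (rules : List (List Char × List Char × String)) (cs : List Char) : String :=
  match rules with
  | [] => ""
  | (prefix_, thirds, aa) :: rest =>
      if PySem.Chars.startswith cs prefix_ &&
         thirds.contains ((PySem.List.pyGet? cs 2).getD ' ') then aa
      else pvScanRules rest cs

def determine_amino_acid_alt (codon : String) : String :=
  if PySem.Str.len codon ≠ 3 then "Error: Codon must be 3 nucleotides long."
  else
    let cs := PySem.Chars.upper codon.toList
    if cs.any (fun n => !(['U', 'C', 'A', 'G'].contains n)) then
      "Error: Codon contains invalid characters."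
    else
      pvScanRules pvRules cs

-- ===== PRECONDITION & SPEC =====
def Spec_determine_amino_acid (codon : String) (out : String) : Prop := out = determine_amino_acid_alt codon
instance (codon : String) (out : String) : Decidable (Spec_determine_amino_acid codon out) := by unfold Spec_determine_amino_acid; infer_instance

-- ===== CLAIM (what is proved, stated in full; the proofs are below) =====
def Claim_equal_determine_amino_acid : Prop := ∀ (codon : String), Dom_determine_amino_acid codon → Spec_determine_amino_acid codon (determine_amino_acid codon)

-- ===== LEMMAS AND PROOFS =====

-- ===== VERDICT (by name: the statement is the Claim_ definition above) =====
theorem determine_amino_acid_spec : Claim_equal_determine_amino_acid := by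
  intro codon _
  show determine_amino_acid codon = determine_amino_acid_alt codon
  unfold determine_amino_acid determine_amino_acid_alt
  by_cases h1 : PySem.Str.len codon ≠ 3
  · rw [if_pos h1, if_pos h1]
  · rw [if_neg h1, if_neg h1]
    show (if (PySem.Chars.upper codon.toList).any (fun n => !(['U','C','A','G'].contains n)) = true then _ else _) = _
    by_cases h2 : (PySem.Chars.upper codon.toList).any (fun n => !(['U','C','A','G'].contains n)) = true
    · rw [if_pos h2, if_pos h2]
    · rw [if_neg h2, if_neg h2]
      have hall : ∀ n ∈ PySem.Chars.upper codon.toList, (['U','C','A','G'].contains n) = true := by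
        intro n hn
        by_contra h
        exact h2 (List.any_eq_true.mpr ⟨n, hn, by rw [eq_false_of_ne_true h]; rfl⟩)
      have hlen3 : (PySem.Chars.upper codon.toList).length = 3 := by
        have hl : (codon.length : Int) = 3 := by
          have := not_not.mp h1
          simpa [PySem.Str.len_eq, PySem.Chars.len] using this
        have : codon.toList.length = 3 := by exact_mod_cast hl
        simpa [PySem.Chars.upper] using this
      obtain ⟨a, b, c, hm⟩ : ∃ a b c, PySem.Chars.upper codon.toList = [a, b, c] := by
        rcases hcs : PySem.Chars.upper codon.toList with _ | ⟨a, _ | ⟨b, _ | ⟨c, _ | ⟨d, t⟩⟩⟩⟩ <;>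
          simp_all
      rw [hm] at hall ⊢
      have ha : a ∈ ['U','C','A','G'] := by simpa using hall a (by simp)
      have hb : b ∈ ['U','C','A','G'] := by simpa using hall b (by simp)
      have hc : c ∈ ['U','C','A','G'] := by simpa using hall c (by simp)
      fin_cases ha <;> fin_cases hb <;> fin_cases hc <;> decide
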